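-- pv_equiv track=rewrite | github.com/wzrabbit/algorithm-practice | BOJ/♣ 34000~34999/34324_KUMOH_문자열.py | get_kumoh_count
-- ===== SOURCE A (Python) =====
-- KUMOH = "KUMOH"
--
-- def get_kumoh_count(text):
--     index = 0
--     count = 0
--
--     for cur in text:
--         if cur != ' ' and cur != KUMOH[index]:
--             index = 0
--
--         if cur == KUMOH[index]:
--             index += 1
--
--         if index == 5:
--             index = 0
--             count += 1
--
--     return count
-- ===== SOURCE B (Python) =====
-- KUMOH = "KUMOH"
--
-- def get_kumoh_count(text):
--     return text.replace(' ', '').count(KUMOH)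
-- ===== Notes on version B (the rewrite author's own statement) =====
-- stated objective: simpler
-- what changed: Replaces A's per-character state machine (manual match-index tracking with reset logic) by stripping spaces with str.replace and counting non-overlapping occurrences of the key word with str.count; correct because the key word has no self-overlap and only literal spaces are transparent.
import Mathlib
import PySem

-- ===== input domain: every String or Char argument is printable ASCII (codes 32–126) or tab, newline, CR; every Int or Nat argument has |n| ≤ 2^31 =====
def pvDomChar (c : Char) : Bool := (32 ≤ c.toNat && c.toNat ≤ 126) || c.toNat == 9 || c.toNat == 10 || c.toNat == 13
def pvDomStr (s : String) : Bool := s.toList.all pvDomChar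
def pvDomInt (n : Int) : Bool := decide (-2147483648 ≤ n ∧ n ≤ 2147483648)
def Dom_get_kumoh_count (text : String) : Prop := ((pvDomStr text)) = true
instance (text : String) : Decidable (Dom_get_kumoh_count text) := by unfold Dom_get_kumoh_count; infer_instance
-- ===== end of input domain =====

-- B replaces A's per-character match-index state machine by stripping spaces with
-- str.replace and counting non-overlapping "KUMOH" occurrences with str.count (simpler).


-- ===== PORT A =====
-- one iteration of A's for-loop body; state = (index, count)
def kumohStep (s : Int × Int) (cur : Char) : Int × Int :=
  let index := s.1
  let count := s.2
  let index := if cur ≠ ' ' ∧ some cur ≠ PySem.Str.pyGet? "KUMOH" index then 0 else index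
  let index := if some cur = PySem.Str.pyGet? "KUMOH" index then index + 1 else index
  if index = 5 then (0, count + 1) else (index, count)

def get_kumoh_count (text : String) : Int :=
  (text.toList.foldl kumohStep (0, 0)).2

-- ===== PORT B =====
def get_kumoh_count_alt (text : String) : Int :=
  (PySem.Str.count (PySem.Str.replace text " " "") "KUMOH" : Int)

-- ===== PRECONDITION & SPEC =====
def Spec_get_kumoh_count (text : String) (out : Int) : Prop := out = get_kumoh_count_alt text
instance (text : String) (out : Int) : Decidable (Spec_get_kumoh_count text out) := by unfold Spec_get_kumoh_count; infer_instance

-- ===== CLAIM (what is proved, stated in full; the proofs are below) =====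
def Claim_equal_get_kumoh_count : Prop := ∀ (text : String), Dom_get_kumoh_count text → Spec_get_kumoh_count text (get_kumoh_count text)

-- ===== LEMMAS AND PROOFS =====

-- non-overlapping left-to-right count of "KUMOH", the recursion str.count performs
def cnt : List Char → Nat
  | [] => 0
  | c :: t => if ("KUMOH".toList).isPrefixOf (c :: t) then 1 + cnt (t.drop 4) else cnt t
termination_by l => l.length
decreasing_by
  all_goals simp [List.length_drop]

theorem count_go_eq_cnt (fuel : Nat) (l : List Char) (acc : Nat) (h : l.length ≤ fuel) :
    PySem.Chars.count.go "KUMOH".toList fuel l acc = acc + cnt l := by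
  induction fuel generalizing l acc with
  | zero =>
    cases l with
    | nil => rw [show cnt [] = 0 from by rw [cnt]]; simp [PySem.Chars.count.go]
    | cons c t => simp at h
  | succ f ih =>
    cases l with
    | nil => rw [show cnt [] = 0 from by rw [cnt]]; simp [PySem.Chars.count.go]
    | cons c t =>
      simp only [PySem.Chars.count.go, cnt]
      by_cases hp : ("KUMOH".toList).isPrefixOf (c :: t) = true
      · have hlen : (t.drop 4).length ≤ f := by
          simp only [List.length_cons] at h
          simp only [List.length_drop]
          omega
        simp only [hp, if_true]
        have hd : List.drop ("KUMOH".toList).length (c :: t) = t.drop 4 := by simp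
        rw [hd, ih _ _ hlen]
        omega
      · have hlen : t.length ≤ f := by simp only [List.length_cons] at h; omega
        simp only [hp, Bool.false_eq_true, if_false]
        rw [ih _ _ hlen]

theorem count_eq_cnt (l : List Char) : PySem.Chars.count l "KUMOH".toList = cnt l := by
  have he : ("KUMOH".toList).isEmpty = false := by decide
  simp only [PySem.Chars.count, he, Bool.false_eq_true, if_false]
  simpa using count_go_eq_cnt l.length l 0 (le_refl _)

theorem replace_go_filter (fuel : Nat) (l acc : List Char) (h : l.length ≤ fuel) :
    PySem.Chars.replace.go [' '] [] fuel l acc = acc.reverse ++ l.filter (fun c => c != ' ') := by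
  induction fuel generalizing l acc with
  | zero =>
    cases l with
    | nil => simp [PySem.Chars.replace.go]
    | cons c t => simp at h
  | succ f ih =>
    cases l with
    | nil => simp [PySem.Chars.replace.go]
    | cons c t =>
      have hlen : t.length ≤ f := by simp only [List.length_cons] at h; omega
      simp only [PySem.Chars.replace.go]
      by_cases hc : c = ' '
      · subst hc
        have hpre : ([' '].isPrefixOf (' ' :: t)) = true := by simp [List.isPrefixOf]
        have hdrop : List.drop ([' '] : List Char).length (' ' :: t) = t := rfl
        rw [if_pos hpre, hdrop, ih _ _ hlen]
        simp
      · have hpre : ([' '].isPrefixOf (c :: t)) = false := by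
          simp [List.isPrefixOf]
          exact fun hh => (hc hh.symm).elim
        rw [if_neg (by rw [hpre]; exact Bool.false_ne_true), ih _ _ hlen]
        simp [hc]

theorem replace_filter (l : List Char) :
    PySem.Chars.replace l [' '] [] = l.filter (fun c => c != ' ') := by
  have he : ([' '] : List Char).isEmpty = false := by decide
  simp only [PySem.Chars.replace, he, Bool.false_eq_true, if_false]
  simpa using replace_go_filter l.length l [] (le_refl _)

-- "KUMOH" contains no space, so pyGet? never yields ' '
theorem pyGet?_kumoh_ne_space (i : Int) : PySem.Str.pyGet? "KUMOH" i ≠ some ' ' := by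
  intro h
  simp only [PySem.Str.pyGet?, PySem.Chars.pyGet?_eq_listPyGet?, PySem.List.pyGet?,
    Option.bind_eq_some_iff] at h
  obtain ⟨k, -, hk⟩ := h
  have := List.mem_of_getElem? hk
  revert this; decide

theorem kumohStep_space (s : Int × Int) (h5 : s.1 ≠ 5) : kumohStep s ' ' = s := by
  have h1 : ¬(' ' ≠ ' ' ∧ some ' ' ≠ PySem.Str.pyGet? "KUMOH" s.1) := fun h => h.1 rfl
  have h2 : ¬(some ' ' = PySem.Str.pyGet? "KUMOH" s.1) :=
    fun h => pyGet?_kumoh_ne_space s.1 h.symm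
  simp only [kumohStep]
  rw [if_neg h1, if_neg h2, if_neg h5]

theorem kumohStep_range (s : Int × Int) (a : Char) (h0 : 0 ≤ s.1) (h5 : s.1 < 5) :
    0 ≤ (kumohStep s a).1 ∧ (kumohStep s a).1 < 5 := by
  simp only [kumohStep]
  split_ifs <;> simp <;> omega

theorem foldl_filter_space (l : List Char) (s : Int × Int) (h0 : 0 ≤ s.1) (h5 : s.1 < 5) :
    (l.filter (fun c => c != ' ')).foldl kumohStep s = l.foldl kumohStep s := by
  induction l generalizing s with
  | nil => rfl
  | cons c t ih =>
    by_cases hc : c = ' '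
    · subst hc
      simp only [List.filter_cons, bne_self_eq_false, Bool.false_eq_true, if_false,
        List.foldl_cons]
      rw [ih s h0 h5, kumohStep_space s (by omega)]
    · have hr := kumohStep_range s c h0 h5
      simp only [List.filter_cons, List.foldl_cons]
      rw [if_pos (by simp [hc])]
      simp only [List.foldl_cons]
      exact ih _ hr.1 hr.2

-- evaluated lookups into "KUMOH"
theorem kget0 : PySem.Str.pyGet? "KUMOH" 0 = some 'K' := by decide
theorem kget1 : PySem.Str.pyGet? "KUMOH" 1 = some 'U' := by decide
theorem kget2 : PySem.Str.pyGet? "KUMOH" 2 = some 'M' := by decide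
theorem kget3 : PySem.Str.pyGet? "KUMOH" 3 = some 'O' := by decide
theorem kget4 : PySem.Str.pyGet? "KUMOH" 4 = some 'H' := by decide
theorem kumoh_toList : "KUMOH".toList = ['K', 'U', 'M', 'O', 'H'] := by decide

-- one step of A from match-state i against a non-space char, as plain data
theorem kumohStep_eval (i : Int) (c : Int) (a : Char) (ha : a ≠ ' ')
    (h0 : 0 ≤ i) (h5 : i < 5) :
    kumohStep (i, c) a =
      if some a = PySem.Str.pyGet? "KUMOH" i then
        (if i = 4 then ((0 : Int), c + 1) else (i + 1, c))
      else if a = 'K' then ((1 : Int), c) else ((0 : Int), c) := by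
  by_cases hm : some a = PySem.Str.pyGet? "KUMOH" i
  · have hA : ¬(a ≠ ' ' ∧ some a ≠ PySem.Str.pyGet? "KUMOH" i) := fun h => h.2 hm
    simp only [kumohStep]
    rw [if_neg hA, if_pos hm, if_pos hm]
    by_cases h4 : i = 4
    · subst h4
      rw [if_pos rfl, if_pos (by norm_num)]
    · rw [if_neg (by omega), if_neg h4]
  · have hA : (a ≠ ' ' ∧ some a ≠ PySem.Str.pyGet? "KUMOH" i) := ⟨ha, hm⟩
    simp only [kumohStep]
    rw [if_neg hm, if_pos hA, kget0]
    by_cases hk : a = 'K'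
    · subst hk
      rw [if_pos rfl, if_pos rfl, if_neg (by norm_num)]
      norm_num
    · rw [if_neg (fun h => hk (Option.some.inj h)), if_neg hk, if_neg (by norm_num)]

theorem cnt_cons_ne_K (a : Char) (t : List Char) (h : a ≠ 'K') :
    cnt (a :: t) = cnt t := by
  rw [cnt, if_neg (by simp [kumoh_toList, List.isPrefixOf, Ne.symm h])]

theorem cnt_reset1 (a : Char) (t : List Char) (h : a ≠ 'U') :
    cnt ('K' :: a :: t) = cnt (a :: t) := by
  rw [cnt, if_neg (by simp [kumoh_toList, List.isPrefixOf, Ne.symm h])]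

theorem cnt_reset2 (a : Char) (t : List Char) (h : a ≠ 'M') :
    cnt ('K' :: 'U' :: a :: t) = cnt (a :: t) := by
  rw [cnt, if_neg (by simp [kumoh_toList, List.isPrefixOf, Ne.symm h])]
  rw [cnt_cons_ne_K 'U' _ (by decide)]

theorem cnt_reset3 (a : Char) (t : List Char) (h : a ≠ 'O') :
    cnt ('K' :: 'U' :: 'M' :: a :: t) = cnt (a :: t) := by
  rw [cnt, if_neg (by simp [kumoh_toList, List.isPrefixOf, Ne.symm h])]
  rw [cnt_cons_ne_K 'U' _ (by decide), cnt_cons_ne_K 'M' _ (by decide)]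

theorem cnt_reset4 (a : Char) (t : List Char) (h : a ≠ 'H') :
    cnt ('K' :: 'U' :: 'M' :: 'O' :: a :: t) = cnt (a :: t) := by
  rw [cnt, if_neg (by simp [kumoh_toList, List.isPrefixOf, Ne.symm h])]
  rw [cnt_cons_ne_K 'U' _ (by decide), cnt_cons_ne_K 'M' _ (by decide),
    cnt_cons_ne_K 'O' _ (by decide)]

theorem cnt_full (t : List Char) :
    cnt ('K' :: 'U' :: 'M' :: 'O' :: 'H' :: t) = 1 + cnt t := by
  rw [cnt, if_pos (by simp [kumoh_toList, List.isPrefixOf])]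
  norm_num

-- main invariant: on a space-free list, from match-state i the loop's count is
-- c plus the KUMOH-count of (matched prefix of length i) ++ rest
theorem kumoh_invariant (l : List Char) (hl : ∀ x ∈ l, x ≠ ' ') (i c : Int)
    (h0 : 0 ≤ i) (h5 : i < 5) :
    (l.foldl kumohStep (i, c)).2 = c + (cnt ("KUMOH".toList.take i.toNat ++ l) : Int) := by
  induction l generalizing i c with
  | nil =>
    simp only [List.foldl_nil, List.append_nil]
    have c0 : cnt [] = 0 := by rw [cnt]
    have c1 : cnt ['K'] = 0 := by rw [cnt, if_neg (by decide)]; exact c0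
    have c2 : cnt ['K', 'U'] = 0 := by
      rw [cnt, if_neg (by decide), cnt, if_neg (by decide)]; exact c0
    have c3 : cnt ['K', 'U', 'M'] = 0 := by
      rw [cnt, if_neg (by decide), cnt, if_neg (by decide), cnt, if_neg (by decide)]; exact c0
    have c4 : cnt ['K', 'U', 'M', 'O'] = 0 := by
      rw [cnt, if_neg (by decide), cnt, if_neg (by decide), cnt, if_neg (by decide),
        cnt, if_neg (by decide)]; exact c0
    interval_cases i <;> norm_num [kumoh_toList] <;>
      first | exact c0 | exact c1 | exact c2 | exact c3 | exact c4
  | cons a t ih =>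
    have ha : a ≠ ' ' := hl a List.mem_cons_self
    have hlt : ∀ x ∈ t, x ≠ ' ' := fun x hx => hl x (List.mem_cons_of_mem a hx)
    rw [List.foldl_cons, kumohStep_eval i c a ha h0 h5]
    interval_cases i
    · rw [kget0]
      by_cases hk : a = 'K'
      · subst hk
        rw [if_pos rfl, if_neg (by norm_num), show ((0 : Int) + 1) = 1 from rfl,
          ih hlt 1 c (by norm_num) (by norm_num)]
        simp [kumoh_toList]
      · rw [if_neg (fun h => hk (Option.some.inj h)), if_neg hk,
          ih hlt 0 c (by norm_num) (by norm_num)]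
        simp only [Int.toNat_zero, List.take_zero, List.nil_append]
        rw [cnt_cons_ne_K a t hk]
    · rw [kget1]
      by_cases hu : a = 'U'
      · subst hu
        rw [if_pos rfl, if_neg (by norm_num), show ((1 : Int) + 1) = 2 from rfl,
          ih hlt 2 c (by norm_num) (by norm_num)]
        simp [kumoh_toList]
      · rw [if_neg (fun h => hu (Option.some.inj h))]
        by_cases hk : a = 'K'
        · subst hk
          rw [if_pos rfl, ih hlt 1 c (by norm_num) (by norm_num)]
          simp only [kumoh_toList, show ((1 : Int)).toNat = 1 from rfl,
            List.take_succ_cons, List.take_zero, List.cons_append,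
            List.nil_append]
          rw [cnt_reset1 'K' t (by decide)]
        · rw [if_neg hk, ih hlt 0 c (by norm_num) (by norm_num)]
          simp only [kumoh_toList, show ((1 : Int)).toNat = 1 from rfl,
            show ((0 : Int)).toNat = 0 from rfl, List.take_succ_cons, List.take_zero,
            List.cons_append, List.nil_append]
          rw [cnt_reset1 a t hu, cnt_cons_ne_K a t hk]
    · rw [kget2]
      by_cases hmm : a = 'M'
      · subst hmm
        rw [if_pos rfl, if_neg (by norm_num), show ((2 : Int) + 1) = 3 from rfl,
          ih hlt 3 c (by norm_num) (by norm_num)]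
        simp [kumoh_toList]
      · rw [if_neg (fun h => hmm (Option.some.inj h))]
        by_cases hk : a = 'K'
        · subst hk
          rw [if_pos rfl, ih hlt 1 c (by norm_num) (by norm_num)]
          simp only [kumoh_toList, show ((1 : Int)).toNat = 1 from rfl,
            show ((2 : Int)).toNat = 2 from rfl, List.take_succ_cons, List.take_zero,
            List.cons_append, List.nil_append]
          rw [cnt_reset2 'K' t (by decide)]
        · rw [if_neg hk, ih hlt 0 c (by norm_num) (by norm_num)]
          simp only [kumoh_toList, show ((2 : Int)).toNat = 2 from rfl,
            show ((0 : Int)).toNat = 0 from rfl, List.take_succ_cons, List.take_zero,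
            List.cons_append, List.nil_append]
          rw [cnt_reset2 a t hmm, cnt_cons_ne_K a t hk]
    · rw [kget3]
      by_cases ho : a = 'O'
      · subst ho
        rw [if_pos rfl, if_neg (by norm_num), show ((3 : Int) + 1) = 4 from rfl,
          ih hlt 4 c (by norm_num) (by norm_num)]
        simp [kumoh_toList]
      · rw [if_neg (fun h => ho (Option.some.inj h))]
        by_cases hk : a = 'K'
        · subst hk
          rw [if_pos rfl, ih hlt 1 c (by norm_num) (by norm_num)]
          simp only [kumoh_toList, show ((1 : Int)).toNat = 1 from rfl,
            show ((3 : Int)).toNat = 3 from rfl, List.take_succ_cons, List.take_zero,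
            List.cons_append, List.nil_append]
          rw [cnt_reset3 'K' t (by decide)]
        · rw [if_neg hk, ih hlt 0 c (by norm_num) (by norm_num)]
          simp only [kumoh_toList, show ((3 : Int)).toNat = 3 from rfl,
            show ((0 : Int)).toNat = 0 from rfl, List.take_succ_cons, List.take_zero,
            List.cons_append, List.nil_append]
          rw [cnt_reset3 a t ho, cnt_cons_ne_K a t hk]
    · rw [kget4]
      by_cases hh : a = 'H'
      · subst hh
        rw [if_pos rfl, if_pos rfl, ih hlt 0 (c + 1) (by norm_num) (by norm_num)]
        simp only [kumoh_toList, show ((4 : Int)).toNat = 4 from rfl,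
          show ((0 : Int)).toNat = 0 from rfl, List.take_succ_cons, List.take_zero,
          List.cons_append, List.nil_append]
        rw [cnt_full t]
        push_cast
        ring
      · rw [if_neg (fun h => hh (Option.some.inj h))]
        by_cases hk : a = 'K'
        · subst hk
          rw [if_pos rfl, ih hlt 1 c (by norm_num) (by norm_num)]
          simp only [kumoh_toList, show ((1 : Int)).toNat = 1 from rfl,
            show ((4 : Int)).toNat = 4 from rfl, List.take_succ_cons, List.take_zero,
            List.cons_append, List.nil_append]
          rw [cnt_reset4 'K' t (by decide)]
        · rw [if_neg hk, ih hlt 0 c (by norm_num) (by norm_num)]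
          simp only [kumoh_toList, show ((4 : Int)).toNat = 4 from rfl,
            show ((0 : Int)).toNat = 0 from rfl, List.take_succ_cons, List.take_zero,
            List.cons_append, List.nil_append]
          rw [cnt_reset4 a t hh, cnt_cons_ne_K a t hk]

-- ===== VERDICT (by name: the statement is the Claim_ definition above) =====
theorem get_kumoh_count_spec : Claim_equal_get_kumoh_count := by
  intro text _
  unfold Spec_get_kumoh_count get_kumoh_count get_kumoh_count_alt
  have hrep : (PySem.Str.replace text " " "").toList = text.toList.filter (fun c => c != ' ') := by
    simp only [PySem.Str.replace]
    rw [String.toList_ofList]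
    have : (" ".toList) = [' '] := by decide
    have h2 : ("".toList) = ([] : List Char) := by decide
    rw [this, h2, replace_filter]
  rw [show PySem.Str.count (PySem.Str.replace text " " "") "KUMOH"
        = PySem.Chars.count (PySem.Str.replace text " " "").toList "KUMOH".toList from rfl,
      hrep, count_eq_cnt]
  rw [← foldl_filter_space text.toList (0, 0) (by norm_num) (by norm_num)]
  have hinv := kumoh_invariant (text.toList.filter (fun c => c != ' '))
    (by intro x hx; simp at hx; exact hx.2) 0 0 (le_refl _) (by norm_num)
  simp only [Int.toNat_zero, List.take_zero, List.nil_append] at hinv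
  rw [hinv]; ring
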